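-- pv_equiv track=rewrite | github.com/xandoliveira2/Diversos | brincando com algoritmos em python/treinandoRecursividade.py | definir_possibilidades
-- ===== SOURCE A (Python) =====
-- def definir_possibilidades(matriz):
--     x=[i for i in range(len(matriz))]
--     y=[i for i in range(len(matriz[0]))]
--     combinations = []
--
--     for i in x:
--         for j in y:
--             combinations.append((i,j))
--     return combinations
-- ===== SOURCE B (Python) =====
-- def definir_possibilidades(matriz):
--     n = len(matriz)
--     m = len(matriz[0])
--     return [divmod(k, m) for k in range(n * m)]
-- ===== Notes on version B (the rewrite author's own statement) =====
-- stated objective: alternative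
-- what changed: Replaces the two nested index loops with a single flat pass over range(n*m), recovering each (row, col) pair arithmetically with divmod(k, m).
-- outside the precondition, e.g. on definir_possibilidades([]): A raises IndexError, B raises IndexError
import Mathlib
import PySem

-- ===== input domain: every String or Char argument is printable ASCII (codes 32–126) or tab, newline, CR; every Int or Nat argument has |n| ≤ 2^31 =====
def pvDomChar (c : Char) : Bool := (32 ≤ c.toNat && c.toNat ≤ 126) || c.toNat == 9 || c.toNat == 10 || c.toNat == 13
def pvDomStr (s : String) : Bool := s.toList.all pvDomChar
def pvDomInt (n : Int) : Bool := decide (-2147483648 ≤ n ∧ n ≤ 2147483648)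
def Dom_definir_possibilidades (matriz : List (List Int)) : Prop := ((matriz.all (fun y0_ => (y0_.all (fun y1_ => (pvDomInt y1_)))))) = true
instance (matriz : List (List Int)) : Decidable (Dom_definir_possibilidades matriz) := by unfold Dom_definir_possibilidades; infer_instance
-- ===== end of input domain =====

-- B replaces the two nested index loops with one flat pass over range(n*m) using divmod (alternative decomposition, same cost).

-- ===== PORT A =====
-- matriz[0] raises IndexError on [] (excluded by Pre_); ported as pyGet? with a default never used inside Pre_.
def definir_possibilidades (matriz : List (List Int)) : List (Int × Int) :=
  let x := PySem.List.pyRange 0 (matriz.length : Int) 1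
  let y := PySem.List.pyRange 0 ((((PySem.List.pyGet? matriz 0).getD []).length : Int)) 1
  x.foldl (fun acc i => y.foldl (fun acc2 j => acc2 ++ [(i, j)]) acc) []

-- ===== PORT B =====
def definir_possibilidades_alt (matriz : List (List Int)) : List (Int × Int) :=
  let n : Int := matriz.length
  let m : Int := ((PySem.List.pyGet? matriz 0).getD []).length
  (PySem.List.pyRange 0 (n * m) 1).map (fun k => (PySem.Int.floordiv k m, PySem.Int.mod k m))

-- ===== PRECONDITION & SPEC =====
-- Pre_ excludes only the empty matrix, on which both Pythons raise IndexError at matriz[0].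
def Pre_definir_possibilidades (matriz : List (List Int)) : Prop := matriz ≠ []
instance (matriz : List (List Int)) : Decidable (Pre_definir_possibilidades matriz) := by unfold Pre_definir_possibilidades; infer_instance
def pvWitness_definir_possibilidades : List (List Int) := [[1, 2], [3, 4]]

def Spec_definir_possibilidades (matriz : List (List Int)) (out : List (Int × Int)) : Prop := out = definir_possibilidades_alt matriz
instance (matriz : List (List Int)) (out : List (Int × Int)) : Decidable (Spec_definir_possibilidades matriz out) := by unfold Spec_definir_possibilidades; infer_instance

-- ===== CLAIM (what is proved, stated in full; the proofs are below) =====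
def Claim_equal_definir_possibilidades : Prop := ∀ (matriz : List (List Int)), Dom_definir_possibilidades matriz → Pre_definir_possibilidades matriz → Spec_definir_possibilidades matriz (definir_possibilidades matriz)

-- ===== LEMMAS AND PROOFS =====

-- inner loop of A = acc ++ map
theorem pv_inner_foldl (y : List Int) (i : Int) (acc : List (Int × Int)) :
    y.foldl (fun acc2 j => acc2 ++ [(i, j)]) acc = acc ++ y.map (fun j => (i, j)) := by
  induction y generalizing acc with
  | nil => simp
  | cons j rest ih => rw [List.foldl_cons, ih, List.map_cons]; simp

-- outer loop of A = acc ++ flatMap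
theorem pv_outer_foldl (x y : List Int) (acc : List (Int × Int)) :
    x.foldl (fun acc i => y.foldl (fun acc2 j => acc2 ++ [(i, j)]) acc) acc
      = acc ++ x.flatMap (fun i => y.map (fun j => (i, j))) := by
  induction x generalizing acc with
  | nil => simp
  | cons i rest ih =>
    rw [List.foldl_cons, pv_inner_foldl, ih, List.flatMap_cons, List.append_assoc]

-- the divmod decomposition over Nat ranges
theorem pv_divmod_range (n m : Nat) :
    (List.range (n * m)).map (fun k => (k / m, k % m))
      = (List.range n).flatMap (fun i => (List.range m).map (fun j => (i, j))) := by
  induction n with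
  | zero => simp
  | succ n ih =>
    rw [Nat.succ_mul, List.range_add, List.map_append, ih, List.range_succ,
        List.flatMap_append, List.flatMap_cons, List.flatMap_nil, List.append_nil]
    congr 1
    rw [List.map_map]
    apply List.map_congr_left
    intro j hj
    have hjm : j < m := List.mem_range.mp hj
    have hm : 0 < m := Nat.lt_of_le_of_lt (Nat.zero_le j) hjm
    simp only [Function.comp]
    have h1 : (n * m + j) / m = n := by
      rw [Nat.mul_comm, Nat.mul_add_div hm, Nat.div_eq_of_lt hjm]
      omega
    have h2 : (n * m + j) % m = j := by
      rw [Nat.mul_comm, Nat.mul_add_mod, Nat.mod_eq_of_lt hjm]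
    rw [h1, h2]

-- the same statement lifted to Int, in the shape the ports produce
theorem pv_key (n m : Nat) :
    (List.range (n * m)).map (fun k : Nat => ((PySem.Int.floordiv (k : Int) (m : Int), PySem.Int.mod (k : Int) (m : Int)) : Int × Int))
      = (List.range n).flatMap (fun i : Nat => (List.range m).map (fun j : Nat => (((i : Int), (j : Int)) : Int × Int))) := by
  simp only [PySem.Int.floordiv_natCast, PySem.Int.mod_natCast]
  rw [show (fun k : Nat => ((((k / m : Nat) : Int), ((k % m : Nat) : Int)) : Int × Int))
        = (fun p : Nat × Nat => (((p.1 : Int), (p.2 : Int)) : Int × Int)) ∘ (fun k => (k / m, k % m)) from rfl,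
      ← List.map_map, pv_divmod_range, List.map_flatMap]
  simp [List.map_map, Function.comp_def]

theorem definir_possibilidades_spec : Claim_equal_definir_possibilidades := by
  intro matriz _ hpre
  unfold Spec_definir_possibilidades definir_possibilidades definir_possibilidades_alt
  obtain ⟨h, t, rfl⟩ : ∃ h t, matriz = h :: t := by
    cases matriz with
    | nil => exact absurd rfl hpre
    | cons h t => exact ⟨h, t, rfl⟩
  have hm0 : PySem.List.pyGet? (h :: t) 0 = some h := by
    simp [PySem.List.pyGet?, PySem.List.pyIdx?]
  rw [hm0]
  simp only [Option.getD_some]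
  rw [pv_outer_foldl, List.nil_append]
  have hcast : ((h :: t).length : Int) * ((h.length : Nat) : Int)
      = (((h :: t).length * h.length : Nat) : Int) := by push_cast; ring
  rw [hcast]
  simp only [PySem.List.pyRange_one, Int.sub_zero, Int.toNat_natCast, Int.zero_add]
  simp only [List.map_map, List.flatMap_map, Function.comp_def]
  rw [← pv_key (h :: t).length h.length]
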